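-- pv_equiv track=rewrite | github.com/dbdesign-students-spring2024/8-pandas-exploration-jlnsr | munge.py | perform_munging_unique_to_dataset
-- ===== SOURCE A (Python) =====
-- def perform_munging_unique_to_dataset(all_data):
--     '''
--     'Cleans' the values in the 'BusinessType' fields
--     '''
--     for record in all_data:
--         for field,value in (record.copy()).items():
--             if field == "BusinessType":
--                 #criteria
--                 if value.startswith("880"):
--                     record[field] = "Bed & Breakfast 1 to 5 rooms"
--                 elif value.startswith("4704"):
--                     record[field] = "Traveler Accomodation"
--                 else:
--                     record[field] = value[7:]#slice-out the # prefix
--     return(all_data)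
-- ===== SOURCE B (Python) =====
-- def _clean(value):
--     if value.startswith("880"):
--         return "Bed & Breakfast 1 to 5 rooms"
--     if value.startswith("4704"):
--         return "Traveler Accomodation"
--     return value[7:]
--
-- def perform_munging_unique_to_dataset(all_data):
--     '''Cleans the 'BusinessType' field of each record, in place, by one direct lookup per record.'''
--     for record in all_data:
--         if "BusinessType" in record:
--             record["BusinessType"] = _clean(record["BusinessType"])
--     return all_data
-- ===== Notes on version B (the rewrite author's own statement) =====
-- stated objective: simpler
-- what changed: B replaces A's per-record copy-and-scan of every field with one direct membership check and lookup of 'BusinessType', applying the prefix rules in a small helper and assigning back in place.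
import Mathlib
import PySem

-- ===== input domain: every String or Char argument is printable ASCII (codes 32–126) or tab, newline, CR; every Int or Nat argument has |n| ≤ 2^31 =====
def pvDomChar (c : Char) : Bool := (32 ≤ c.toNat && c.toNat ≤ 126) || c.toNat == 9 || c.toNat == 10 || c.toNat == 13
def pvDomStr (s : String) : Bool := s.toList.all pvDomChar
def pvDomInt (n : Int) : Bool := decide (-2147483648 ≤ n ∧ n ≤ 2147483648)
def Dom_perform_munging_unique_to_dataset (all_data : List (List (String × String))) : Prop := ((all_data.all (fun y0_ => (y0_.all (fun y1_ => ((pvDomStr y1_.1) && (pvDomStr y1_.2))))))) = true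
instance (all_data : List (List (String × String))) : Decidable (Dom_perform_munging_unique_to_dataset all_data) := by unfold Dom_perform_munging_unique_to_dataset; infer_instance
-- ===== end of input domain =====

-- B is simpler: one membership check + lookup per record instead of A's copy-and-scan over every field.
-- A mutates the records in place in Python; the equivalence proved here is about the returned value.

-- ===== PORT A =====
def perform_munging_unique_to_dataset (all_data : List (List (String × String))) : List (List (String × String)) :=
  all_data.map (fun record =>
    ((PySem.Dict.mk record).items.foldl
      (fun (rec : PySem.Dict String String) fv =>
        if fv.1 == "BusinessType" then
          if PySem.Str.startswith fv.2 "880" then rec.insert fv.1 "Bed & Breakfast 1 to 5 rooms"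
          else if PySem.Str.startswith fv.2 "4704" then rec.insert fv.1 "Traveler Accomodation"
          else rec.insert fv.1 (PySem.Str.slice fv.2 (some 7) none)
        else rec)
      (PySem.Dict.mk record)).items)

-- ===== PORT B =====
def pvClean (value : String) : String :=
  if PySem.Str.startswith value "880" then "Bed & Breakfast 1 to 5 rooms"
  else if PySem.Str.startswith value "4704" then "Traveler Accomodation"
  else PySem.Str.slice value (some 7) none

def perform_munging_unique_to_dataset_alt (all_data : List (List (String × String))) : List (List (String × String)) :=
  all_data.map (fun record =>
    match (PySem.Dict.mk record).get? "BusinessType" with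
    | some v => ((PySem.Dict.mk record).insert "BusinessType" (pvClean v)).items
    | none => record)

-- ===== PRECONDITION & SPEC =====
-- Pre_ excludes association lists in which some record repeats a key: those do not represent any
-- Python dict (Python's dict inputs always have unique keys), so A's behaviour is not defined there.
def Pre_perform_munging_unique_to_dataset (all_data : List (List (String × String))) : Prop :=
  ∀ r ∈ all_data, (r.map Prod.fst).Nodup
instance (all_data : List (List (String × String))) : Decidable (Pre_perform_munging_unique_to_dataset all_data) := by unfold Pre_perform_munging_unique_to_dataset; infer_instance
def pvWitness_perform_munging_unique_to_dataset : (List (List (String × String))) :=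
  [[("BusinessType", "8801234"), ("name", "x")], [("other", "y")]]

def Spec_perform_munging_unique_to_dataset (all_data : List (List (String × String))) (out : List (List (String × String))) : Prop := out = perform_munging_unique_to_dataset_alt all_data
instance (all_data : List (List (String × String))) (out : List (List (String × String))) : Decidable (Spec_perform_munging_unique_to_dataset all_data out) := by unfold Spec_perform_munging_unique_to_dataset; infer_instance

-- ===== CLAIM (what is proved, stated in full; the proofs are below) =====
def Claim_equal_perform_munging_unique_to_dataset : Prop := ∀ (all_data : List (List (String × String))), Dom_perform_munging_unique_to_dataset all_data → Pre_perform_munging_unique_to_dataset all_data → Spec_perform_munging_unique_to_dataset all_data (perform_munging_unique_to_dataset all_data)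

-- ===== LEMMAS AND PROOFS =====

theorem pv_get?_mk_eq_find? (l : List (String × String)) (k : String) :
    (PySem.Dict.mk l).get? k = (l.find? (fun p => p.1 == k)).map Prod.snd := by
  induction l with
  | nil => rfl
  | cons p rest ih =>
    obtain ⟨a, b⟩ := p
    rw [PySem.Dict.get?_mk_cons, List.find?_cons]
    by_cases h : a = k
    · simp [h]
    · have hb : (a == k) = false := by simp [h]
      simp [hb, ih]

theorem pv_fold_eq (l : List (String × String)) (d : PySem.Dict String String)
    (h : (l.map Prod.fst).Nodup) :
    l.foldl
      (fun (rec : PySem.Dict String String) fv =>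
        if fv.1 == "BusinessType" then
          if PySem.Str.startswith fv.2 "880" then rec.insert fv.1 "Bed & Breakfast 1 to 5 rooms"
          else if PySem.Str.startswith fv.2 "4704" then rec.insert fv.1 "Traveler Accomodation"
          else rec.insert fv.1 (PySem.Str.slice fv.2 (some 7) none)
        else rec) d
    = match (l.find? (fun p => p.1 == "BusinessType")).map Prod.snd with
      | some v => d.insert "BusinessType" (pvClean v)
      | none => d := by
  induction l generalizing d with
  | nil => rfl
  | cons p rest ih =>
    obtain ⟨a, b⟩ := p
    simp only [List.map_cons, List.nodup_cons] at h
    rw [List.foldl_cons, List.find?_cons]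
    by_cases ha : a = "BusinessType"
    · subst ha
      have hnone : rest.find? (fun p => p.1 == "BusinessType") = none := by
        apply List.find?_eq_none.mpr
        intro p hp
        simp only [beq_iff_eq]
        intro hpk
        exact h.1 (hpk ▸ List.mem_map_of_mem hp)
      simp only [beq_self_eq_true, if_true, Option.map_some]
      rw [ih _ h.2, hnone]
      simp only [Option.map_none]
      unfold pvClean
      split_ifs <;> rfl
    · have hb : (a == "BusinessType") = false := by simp [ha]
      simp only [hb, if_false, Bool.false_eq_true]
      exact ih d h.2

-- ===== VERDICT (by name: the statement is the Claim_ definition above) =====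
theorem perform_munging_unique_to_dataset_spec : Claim_equal_perform_munging_unique_to_dataset := by
  intro all_data _hdom hpre
  unfold Spec_perform_munging_unique_to_dataset
  unfold perform_munging_unique_to_dataset perform_munging_unique_to_dataset_alt
  apply List.map_congr_left
  intro record hr
  have hnd := hpre record hr
  have hitems : (PySem.Dict.mk record).items = record := rfl
  rw [hitems, pv_fold_eq record _ hnd, pv_get?_mk_eq_find? record "BusinessType"]
  cases hfind : (record.find? (fun p => p.1 == "BusinessType")).map Prod.snd with
  | none => rfl
  | some v => rfl
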